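-- pv_equiv track=rewrite | github.com/WenW186079/TeamLab | modules/tfidf_featureSelection.py | term_freq
-- ===== SOURCE A (Python) =====
-- def term_freq(texts):
--     """Calculate the term frequency and also build the vocab along with it.
--
--     Args:
--         texts (list of list): list of row data from the dataframe. Ex: [[row1 token list],[row2 token list]]
--
--     Returns:
--         _type_: vocab, term frequency
--     """
--     tf_dict = {}
--     vocab = {}
--
--     for text in texts:
--         # unique_words = set(text)
--         # for word in unique_words:
--         for word in text:
--             if word not in vocab:
--                 vocab[word] = len(vocab)
--                 tf_dict[word] = 1
--             else:
--                 tf_dict[word] += 1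
--     return tf_dict, vocab
-- ===== SOURCE B (Python) =====
-- def term_freq(texts):
--     # Different algorithm: flatten the token stream, dedupe to first-occurrence
--     # order, then count each distinct word by scanning the flat list.
--     words = [w for text in texts for w in text]
--     uniq = list(dict.fromkeys(words))
--     tf_dict = {w: words.count(w) for w in uniq}
--     vocab = {w: i for i, w in enumerate(uniq)}
--     return tf_dict, vocab
-- ===== Notes on version B (the rewrite author's own statement) =====
-- stated objective: alternative
-- what changed: Replaces A's single pass that maintains tf_dict and vocab together with a flatten-dedup-count algorithm: flatten all tokens, dedupe to first-occurrence order, then compute each word's frequency by an independent words.count scan and the vocab by enumerating the deduped list; no running dictionary state is threaded through the token loop.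
import Mathlib
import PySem

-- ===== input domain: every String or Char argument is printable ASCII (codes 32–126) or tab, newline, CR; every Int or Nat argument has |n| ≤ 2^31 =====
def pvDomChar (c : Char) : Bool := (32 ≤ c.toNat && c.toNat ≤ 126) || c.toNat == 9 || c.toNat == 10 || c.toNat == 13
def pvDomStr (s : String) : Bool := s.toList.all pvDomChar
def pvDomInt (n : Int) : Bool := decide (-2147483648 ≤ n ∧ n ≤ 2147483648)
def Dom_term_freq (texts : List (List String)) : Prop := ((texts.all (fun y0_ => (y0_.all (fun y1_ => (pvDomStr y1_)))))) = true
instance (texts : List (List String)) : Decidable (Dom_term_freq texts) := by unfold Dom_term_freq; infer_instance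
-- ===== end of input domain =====

-- B replaces A's single interleaved loop (tf_dict and vocab maintained together) by a different
-- algorithm: flatten all tokens, dedupe to first-occurrence order, count each distinct word by
-- an independent scan of the flat list, and enumerate the deduped list for vocab (alternative, not faster).


-- ===== PORT A =====
-- one loop over all tokens, maintaining tf_dict and vocab simultaneously;
-- 'tf_dict[word] += 1' ported as modify word 0 (·+1) — the key is always present there
-- (word ∈ vocab ↔ word ∈ tf_dict on every reachable state), so no KeyError is reachable.
def term_freq (texts : List (List String)) : (List (String × Int)) × (List (String × Int)) :=
  let st :=
    texts.foldl
      (fun (st : PySem.Dict String Int × PySem.Dict String Int) text =>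
        text.foldl
          (fun st word =>
            if st.2.contains word = false then
              (st.1.insert word 1, st.2.insert word (st.2.size : Int))
            else
              (st.1.modify word 0 (· + 1), st.2))
          st)
      (PySem.Dict.empty, PySem.Dict.empty)
  (st.1.items, st.2.items)

-- ===== PORT B =====
-- words = [w for text in texts for w in text]; uniq = list(dict.fromkeys(words));
-- tf_dict = {w: words.count(w) for w in uniq}; vocab = {w: i for i, w in enumerate(uniq)}
def term_freq_alt (texts : List (List String)) : (List (String × Int)) × (List (String × Int)) :=
  let words := texts.flatten
  let uniq := PySem.List.dedup words
  let tf :=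
    uniq.foldl
      (fun (d : PySem.Dict String Int) w => d.insert w (PySem.List.count words w : Int))
      PySem.Dict.empty
  let vocab :=
    (PySem.List.enumerate uniq 0).foldl
      (fun (d : PySem.Dict String Int) p => d.insert p.2 p.1) PySem.Dict.empty
  (tf.items, vocab.items)

-- ===== PRECONDITION & SPEC =====
def Spec_term_freq (texts : List (List String)) (out : (List (String × Int)) × (List (String × Int))) : Prop := out = term_freq_alt texts
instance (texts : List (List String)) (out : (List (String × Int)) × (List (String × Int))) : Decidable (Spec_term_freq texts out) := by unfold Spec_term_freq; infer_instance

-- ===== CLAIM (what is proved, stated in full; the proofs are below) =====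
def Claim_equal_term_freq : Prop := ∀ (texts : List (List String)), Dom_term_freq texts → Spec_term_freq texts (term_freq texts)

-- ===== LEMMAS AND PROOFS =====

-- A's loop body on a joint state, and the Counter-style step its tf component tracks
def stepA (st : PySem.Dict String Int × PySem.Dict String Int) (word : String) :
    PySem.Dict String Int × PySem.Dict String Int :=
  if st.2.contains word = false then
    (st.1.insert word 1, st.2.insert word (st.2.size : Int))
  else
    (st.1.modify word 0 (· + 1), st.2)

def stepC (d : PySem.Dict String Int) (word : String) : PySem.Dict String Int :=
  d.insert word (d.getD word 0 + 1)

-- invariant relating A's vocab to A's tf_dict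
def LoopInv (st : PySem.Dict String Int × PySem.Dict String Int) : Prop :=
  st.1.keys.Nodup ∧
  st.2.items = (PySem.List.enumerate st.1.keys 0).map (fun p => (p.2, p.1))

lemma enumerate_append_singleton (xs : List String) (y : String) (s : Int) :
    PySem.List.enumerate (xs ++ [y]) s
      = PySem.List.enumerate xs s ++ [(s + xs.length, y)] := by
  induction xs generalizing s with
  | nil => simp [PySem.List.enumerate_cons, PySem.List.enumerate_nil]
  | cons x xs ih =>
      simp [PySem.List.enumerate_cons, ih]
      omega

lemma loopinv_step (st : PySem.Dict String Int × PySem.Dict String Int) (w : String)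
    (h : LoopInv st) : LoopInv (stepA st w) ∧ (stepA st w).1 = stepC st.1 w := by
  obtain ⟨hnd, hit⟩ := h
  have hkeys : st.2.keys = st.1.keys := by
    show st.2.items.map (·.1) = _
    rw [hit]
    simp [List.map_map, Function.comp_def]
  have hcont : st.2.contains w = st.1.contains w := by
    by_cases hw : w ∈ st.1.keys
    · rw [(PySem.Dict.contains_iff_mem_keys st.2 w).2 (hkeys ▸ hw),
          (PySem.Dict.contains_iff_mem_keys st.1 w).2 hw]
    · have h2 : ¬ (st.2.contains w = true) := fun hc =>
        hw (hkeys ▸ (PySem.Dict.contains_iff_mem_keys st.2 w).1 hc)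
      have h1 : ¬ (st.1.contains w = true) := fun hc =>
        hw ((PySem.Dict.contains_iff_mem_keys st.1 w).1 hc)
      simp at h2 h1
      rw [h2, h1]
  by_cases hc : st.1.contains w = false
  · -- fresh word: both append
    have hc2 : st.2.contains w = false := by rw [hcont, hc]
    have hstep : stepA st w = (st.1.insert w 1, st.2.insert w (st.2.size : Int)) := by
      simp [stepA, hc2]
    have hsize : (st.2.size : Int) = (st.1.keys.length : Int) := by
      show ((st.2.items.length : Nat) : Int) = _
      rw [hit]
      simp [PySem.List.length_enumerate]
    refine ⟨⟨?_, ?_⟩, ?_⟩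
    · show (stepA st w).1.keys.Nodup
      rw [hstep]
      exact PySem.Dict.nodup_keys_insert st.1 w 1 hnd
    · show (stepA st w).2.items = _
      rw [hstep]
      show (st.2.insert w (st.2.size : Int)).items = _
      rw [PySem.Dict.items_insert_of_not_contains st.2 ((st.2.size : Int)) hc2,
          PySem.Dict.keys_insert_of_not_contains st.1 (1 : Int) hc,
          enumerate_append_singleton, hit]
      simp [hsize]
    · rw [hstep]
      show st.1.insert w 1 = stepC st.1 w
      unfold stepC
      rw [PySem.Dict.getD_of_not_contains st.1 0 hc]
      norm_num
  · -- seen word: vocab untouched, tf updated in place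
    have hc1 : st.1.contains w = true := by
      cases h : st.1.contains w
      · exact absurd h hc
      · rfl
    have hc2 : st.2.contains w = true := by rw [hcont, hc1]
    have hstep : stepA st w = (st.1.modify w 0 (· + 1), st.2) := by
      simp [stepA, hc2]
    have hkm : (st.1.modify w 0 (· + 1)).keys = st.1.keys := by
      rw [PySem.Dict.keys_modify, PySem.Dict.keys_insert_of_contains st.1 _ hc1]
    refine ⟨⟨?_, ?_⟩, ?_⟩
    · show (stepA st w).1.keys.Nodup
      rw [hstep]
      show (st.1.modify w 0 (· + 1)).keys.Nodup
      rw [hkm]; exact hnd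
    · show (stepA st w).2.items = _
      rw [hstep]
      show st.2.items = _
      rw [hkm]
      exact hit
    · rw [hstep]
      show st.1.modify w 0 (· + 1) = stepC st.1 w
      unfold stepC PySem.Dict.modify
      rfl

-- folding A's step from an invariant state: invariant preserved, tf component = the Counter fold
lemma foldl_stepA (ws : List String) :
    ∀ st, LoopInv st →
      LoopInv (ws.foldl stepA st) ∧ (ws.foldl stepA st).1 = ws.foldl stepC st.1 := by
  induction ws with
  | nil => intro st h; exact ⟨h, rfl⟩
  | cons w ws ih =>
      intro st h
      obtain ⟨hinv, htf⟩ := loopinv_step st w h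
      obtain ⟨hinv', htf'⟩ := ih (stepA st w) hinv
      exact ⟨hinv', by rw [List.foldl_cons, List.foldl_cons, htf', htf]⟩

lemma loopinv_empty : LoopInv (PySem.Dict.empty, PySem.Dict.empty) := by
  constructor
  · exact PySem.Dict.nodup_keys_empty
  · rfl

-- ===== VERDICT (by name: the statement is the Claim_ definition above) =====
theorem term_freq_spec : Claim_equal_term_freq := by
  intro texts _
  show term_freq texts = term_freq_alt texts
  -- A: collapse the nested folds to one fold of stepA over the flattened token stream
  have hA : term_freq texts
      = ((texts.flatten.foldl stepA (PySem.Dict.empty, PySem.Dict.empty)).1.items,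
         (texts.flatten.foldl stepA (PySem.Dict.empty, PySem.Dict.empty)).2.items) := by
    unfold term_freq
    rw [show (fun (st : PySem.Dict String Int × PySem.Dict String Int) (text : List String) =>
          text.foldl
            (fun st word =>
              if st.2.contains word = false then
                (st.1.insert word 1, st.2.insert word (st.2.size : Int))
              else
                (st.1.modify word 0 (· + 1), st.2))
            st) = (fun st text => text.foldl stepA st) from rfl,
        ← List.foldl_flatten]
  -- B: name its two comprehension folds (zeta-reduction of the lets, by rfl)
  have hB : term_freq_alt texts
      = (((PySem.List.dedup texts.flatten).foldl
            (fun (d : PySem.Dict String Int) w =>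
              d.insert w (PySem.List.count texts.flatten w : Int)) PySem.Dict.empty).items,
         ((PySem.List.enumerate (PySem.List.dedup texts.flatten) 0).foldl
            (fun (d : PySem.Dict String Int) p => d.insert p.2 p.1) PySem.Dict.empty).items) := rfl
  rw [hA, hB]
  obtain ⟨⟨hnd, hit⟩, htf⟩ := foldl_stepA texts.flatten _ loopinv_empty
  set ws := texts.flatten with hws
  set stA := ws.foldl stepA (PySem.Dict.empty, PySem.Dict.empty) with hstA
  -- A's tf component IS the Counter of the flattened stream
  have htfC : stA.1 = PySem.Dict.counter ws := by
    rw [htf]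
    exact PySem.Dict.foldl_insert_getD_add_one_eq_counter ws
  -- B's two dict comprehensions insert distinct fresh keys: items = the mapped list
  have hBtf :
      ((PySem.List.dedup ws).foldl
          (fun (d : PySem.Dict String Int) w => d.insert w (PySem.List.count ws w : Int))
          PySem.Dict.empty).items
        = (PySem.List.dedup ws).map (fun w => (w, (PySem.List.count ws w : Int))) := by
    rw [PySem.Dict.items_foldl_insert_fresh (PySem.List.dedup ws)
          (fun w => w) (fun w => (PySem.List.count ws w : Int)) PySem.Dict.empty
          (fun a _ => PySem.Dict.contains_empty _)
          (by simp)]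
    rfl
  have hBvoc :
      ((PySem.List.enumerate (PySem.List.dedup ws) 0).foldl
          (fun (d : PySem.Dict String Int) p => d.insert p.2 p.1) PySem.Dict.empty).items
        = (PySem.List.enumerate (PySem.List.dedup ws) 0).map (fun p => (p.2, p.1)) := by
    rw [PySem.Dict.items_foldl_insert_fresh (PySem.List.enumerate (PySem.List.dedup ws) 0)
          (fun p => p.2) (fun p => p.1) PySem.Dict.empty
          (fun a _ => PySem.Dict.contains_empty _)
          (by rw [PySem.List.map_snd_enumerate]; exact PySem.List.nodup_dedup ws)]
    rfl
  refine Prod.ext ?_ ?_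
  · show stA.1.items = _
    rw [htfC, PySem.Dict.items_counter, hBtf, PySem.List.dedup_eq_ofList]
    simp [PySem.List.count_eq]
  · show stA.2.items = _
    rw [hit, htfC, PySem.Dict.keys_counter, hBvoc, PySem.List.dedup_eq_ofList]
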